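-- pv_equiv track=rewrite | github.com/guilhermecossouza/proj_loterica | funcoes/resultados_concurso.py | trabalhando_dezenas
-- ===== SOURCE A (Python) =====
-- def trabalhando_dezenas(inicio, termino, dezenas):
--     dict_dezenas = dict()
--     lista_dezenas = list()
--
--     for dezena in range(inicio, termino + 1):
--         dict_dezenas[str(dezena)] = dezenas.count(dezena)
--
--     lista_dezenas.append(dict(
--         sorted(dict_dezenas.items(), key=lambda item: item[1], reverse=True)))
--
--     return lista_dezenas
-- ===== SOURCE B (Python) =====
-- def trabalhando_dezenas(inicio, termino, dezenas):
--     counts = {}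
--     for d in dezenas:
--         counts[d] = counts.get(d, 0) + 1
--     buckets = {}
--     for d in range(inicio, termino + 1):
--         buckets.setdefault(counts.get(d, 0), []).append(d)
--     result = {}
--     for c in sorted(buckets, reverse=True):
--         for d in buckets[c]:
--             result[str(d)] = c
--     return [result]
-- ===== Notes on version B (the rewrite author's own statement) =====
-- stated objective: alternative
-- what changed: Replaces the per-range-element dezenas.count scan with one counting pass over dezenas, and replaces sorted(items, reverse=True) over all range entries with grouping into frequency buckets and emitting the few distinct frequencies in descending order (buckets filled in ascending range order, which reproduces the stable reverse sort's tie order).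
import Mathlib
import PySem

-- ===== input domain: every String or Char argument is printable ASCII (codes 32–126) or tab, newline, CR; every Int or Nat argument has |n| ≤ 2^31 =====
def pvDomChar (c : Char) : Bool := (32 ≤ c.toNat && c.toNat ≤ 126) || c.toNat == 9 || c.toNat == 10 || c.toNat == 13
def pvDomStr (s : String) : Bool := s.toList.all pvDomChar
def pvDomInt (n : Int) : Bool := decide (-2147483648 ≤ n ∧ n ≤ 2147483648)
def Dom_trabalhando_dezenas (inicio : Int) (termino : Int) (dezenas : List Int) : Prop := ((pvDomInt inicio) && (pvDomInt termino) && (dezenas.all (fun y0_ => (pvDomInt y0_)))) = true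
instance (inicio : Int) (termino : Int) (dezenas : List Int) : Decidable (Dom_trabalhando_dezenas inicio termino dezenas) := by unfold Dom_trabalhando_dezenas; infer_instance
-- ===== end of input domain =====

-- B replaces A's per-range-element `dezenas.count` scan by one counting pass and A's
-- `sorted(..., reverse=True)` over all range entries by frequency buckets emitted in
-- descending frequency order (objective: alternative algorithm).

-- ===== PORT A =====
def trabalhando_dezenas (inicio : Int) (termino : Int) (dezenas : List Int) : List (List (String × Int)) :=
  -- dict_dezenas[str(dezena)] = dezenas.count(dezena)  for dezena in range(inicio, termino+1)
  let dict_dezenas : PySem.Dict String Int :=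
    (PySem.List.pyRange inicio (termino + 1) 1).foldl
      (fun d dezena => d.insert (PySem.Int.toStr dezena) ((PySem.List.count dezenas dezena : Nat) : Int))
      PySem.Dict.empty
  let lista_dezenas : List (List (String × Int)) := []
  -- dict(sorted(dict_dezenas.items(), key=lambda item: item[1], reverse=True))
  let sorted_dict : PySem.Dict String Int :=
    (PySem.List.sorted dict_dezenas.items (fun item => item.2) true).foldl
      (fun d p => d.insert p.1 p.2) PySem.Dict.empty
  lista_dezenas ++ [sorted_dict.items]

-- ===== PORT B =====
def trabalhando_dezenas_alt (inicio : Int) (termino : Int) (dezenas : List Int) : List (List (String × Int)) :=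
  -- counts[d] = counts.get(d, 0) + 1  for d in dezenas
  let counts : PySem.Dict Int Int :=
    dezenas.foldl (fun d x => d.insert x (d.getD x 0 + 1)) PySem.Dict.empty
  -- buckets.setdefault(counts.get(d, 0), []).append(d)  for d in range(inicio, termino+1)
  let buckets : PySem.Dict Int (List Int) :=
    (PySem.List.pyRange inicio (termino + 1) 1).foldl
      (fun b d => b.modify (counts.getD d 0) [] (fun l => l ++ [d])) PySem.Dict.empty
  -- result[str(d)] = c  for c in sorted(buckets, reverse=True) for d in buckets[c]
  let result : PySem.Dict String Int :=
    (PySem.List.sorted buckets.keys (fun c => c) true).foldl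
      (fun r c => (buckets.getD c []).foldl (fun r d => r.insert (PySem.Int.toStr d) c) r)
      PySem.Dict.empty
  [result.items]

-- ===== PRECONDITION & SPEC =====
def Spec_trabalhando_dezenas (inicio : Int) (termino : Int) (dezenas : List Int) (out : List (List (String × Int))) : Prop := out = trabalhando_dezenas_alt inicio termino dezenas
instance (inicio : Int) (termino : Int) (dezenas : List Int) (out : List (List (String × Int))) : Decidable (Spec_trabalhando_dezenas inicio termino dezenas out) := by unfold Spec_trabalhando_dezenas; infer_instance

-- ===== CLAIM (what is proved, stated in full; the proofs are below) =====
def Claim_equal_trabalhando_dezenas : Prop := ∀ (inicio : Int) (termino : Int) (dezenas : List Int), Dom_trabalhando_dezenas inicio termino dezenas → Spec_trabalhando_dezenas inicio termino dezenas (trabalhando_dezenas inicio termino dezenas)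

-- ===== LEMMAS AND PROOFS =====

/- ## str(n) is injective -/

def pvDigitsRep (n : Nat) : List Char :=
  if _h : n < 10 then [Nat.digitChar n]
  else pvDigitsRep (n / 10) ++ [Nat.digitChar (n % 10)]
  decreasing_by exact Nat.div_lt_self (by omega) (by omega)

def pvVal (l : List Char) : Nat := l.foldl (fun a c => 10 * a + (c.toNat - 48)) 0

lemma pvVal_append_singleton (l : List Char) (c : Char) :
    pvVal (l ++ [c]) = 10 * pvVal l + (c.toNat - 48) := by
  simp [pvVal, List.foldl_append]

lemma pvDigitChar_val {d : Nat} (h : d < 10) : (Nat.digitChar d).toNat - 48 = d := by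
  interval_cases d <;> rfl

lemma pvVal_digitsRep (n : Nat) : pvVal (pvDigitsRep n) = n := by
  induction n using Nat.strong_induction_on with
  | _ n ih =>
    rw [pvDigitsRep]
    by_cases h : n < 10
    · simp [h, pvVal, pvDigitChar_val h]
    · simp only [h, dite_false, pvVal_append_singleton]
      rw [ih (n / 10) (Nat.div_lt_self (by omega) (by omega)),
        pvDigitChar_val (Nat.mod_lt _ (by omega))]
      omega

lemma pvToDigitsCore_eq (fuel n : Nat) (acc : List Char) (h : n < fuel) :
    Nat.toDigitsCore 10 fuel n acc = pvDigitsRep n ++ acc := by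
  induction fuel generalizing n acc with
  | zero => omega
  | succ fuel ih =>
    simp only [Nat.toDigitsCore]
    rw [pvDigitsRep]
    by_cases h10 : n < 10
    · have hz : n / 10 = 0 := Nat.div_eq_of_lt h10
      simp [hz, h10, Nat.mod_eq_of_lt h10]
    · have hne : ¬ n / 10 = 0 := by omega
      simp only [hne, if_false, h10, dite_false]
      rw [ih (n / 10) _ (by omega)]
      simp

lemma pvToDigits_eq (n : Nat) : Nat.toDigits 10 n = pvDigitsRep n := by
  rw [Nat.toDigits, pvToDigitsCore_eq _ _ _ (by omega)]; simp

lemma pvDigitsRep_inj {a b : Nat} (h : pvDigitsRep a = pvDigitsRep b) : a = b := by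
  have := pvVal_digitsRep a
  rw [h, pvVal_digitsRep] at this
  omega

lemma pvDigitChar_ne_dash {d : Nat} (h : d < 10) : Nat.digitChar d ≠ '-' := by
  interval_cases d <;> decide

lemma pvDigitsRep_no_dash (n : Nat) : ∀ c ∈ pvDigitsRep n, c ≠ '-' := by
  induction n using Nat.strong_induction_on with
  | _ n ih =>
    rw [pvDigitsRep]
    by_cases h : n < 10
    · simp only [h, dite_true, List.mem_singleton]
      rintro c rfl
      exact pvDigitChar_ne_dash h
    · simp only [h, dite_false, List.mem_append, List.mem_singleton]
      rintro c (hc | rfl)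
      · exact ih (n / 10) (Nat.div_lt_self (by omega) (by omega)) c hc
      · exact pvDigitChar_ne_dash (Nat.mod_lt _ (by omega))

lemma pvToChars_inj {a b : Int} (h : PySem.Int.toChars a = PySem.Int.toChars b) : a = b := by
  unfold PySem.Int.toChars at h
  by_cases ha : a < 0 <;> by_cases hb : b < 0 <;>
    simp only [ha, hb, if_true, if_false] at h <;>
    rw [pvToDigits_eq, pvToDigits_eq] at h
  · simp only [List.cons.injEq, true_and] at h
    have := pvDigitsRep_inj h
    omega
  · have hm : '-' ∈ pvDigitsRep b.toNat := by rw [← h]; exact List.mem_cons_self ..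
    exact absurd rfl (pvDigitsRep_no_dash _ _ hm)
  · have hm : '-' ∈ pvDigitsRep a.toNat := by rw [h]; exact List.mem_cons_self ..
    exact absurd rfl (pvDigitsRep_no_dash _ _ hm)
  · have := pvDigitsRep_inj h
    omega

lemma pvToStr_inj : Function.Injective PySem.Int.toStr := by
  intro a b h
  apply pvToChars_inj
  have := congrArg String.toList h
  simpa [PySem.Int.toList_toStr] using this

/- ## stable reverse sort = descending bucket concatenation -/

lemma pvInsertBy_cons {α : Type} (before : α → α → Bool) (x y : α) (ys : List α) :
    PySem.List.insertBy before x (y :: ys) =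
      if before x y then x :: y :: ys else y :: PySem.List.insertBy before x ys := rfl

lemma pvInsertBy_all_true {α : Type} (before : α → α → Bool) (x : α) (ys : List α)
    (h : ∀ y ∈ ys, before x y = true) : PySem.List.insertBy before x ys = x :: ys := by
  cases ys with
  | nil => rfl
  | cons y ys => rw [pvInsertBy_cons, h y (List.mem_cons_self ..)]; simp

lemma pvInsertBy_append_false {α : Type} (before : α → α → Bool) (x : α) (zs ws : List α)
    (h : ∀ z ∈ zs, before x z = false) :
    PySem.List.insertBy before x (zs ++ ws) = zs ++ PySem.List.insertBy before x ws := by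
  induction zs with
  | nil => rfl
  | cons z zs ih =>
    rw [List.cons_append, pvInsertBy_cons, h z (List.mem_cons_self ..)]
    simp only [Bool.false_eq_true, if_false, List.cons_append, List.cons.injEq, true_and]
    exact ih (fun z hz => h z (List.mem_cons_of_mem _ hz))

def pvBuckets {α : Type} (key : α → Int) (n : Int) (ps : List α) : List α :=
  (PySem.List.pyRange n (-1) (-1)).flatMap (fun c => ps.filter (fun p => key p == c))

lemma pvFlatMap_congr {α β : Type} {l : List α} {f g : α → List β}
    (h : ∀ a ∈ l, f a = g a) : l.flatMap f = l.flatMap g := by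
  induction l with
  | nil => rfl
  | cons a l ih =>
    simp only [List.flatMap_cons, h a (List.mem_cons_self ..)]
    rw [ih (fun a ha => h a (List.mem_cons_of_mem _ ha))]

lemma pvDesc_split (n c : Int) (h0 : 0 ≤ c) (hn : c ≤ n) :
    PySem.List.pyRange n (-1) (-1) =
      (PySem.List.pyRange (c + 1) (n + 1) 1).reverse ++ [c] ++
        (PySem.List.pyRange 0 c 1).reverse := by
  rw [PySem.List.pyRange_neg_one_eq_reverse, show (-1 : Int) + 1 = 0 from by norm_num]
  rw [PySem.List.pyRange_one_append 0 c (n+1) (by omega) (by omega),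
    PySem.List.pyRange_one_append c (c+1) (n+1) (by omega) (by omega),
    PySem.List.pyRange_one_singleton]
  simp [List.reverse_append]

lemma pvBuckets_step {α : Type} (key : α → Int) (n : Int) (ps : List α) (x : α)
    (h0 : 0 ≤ key x) (hn : key x ≤ n) :
    PySem.List.insertBy (fun a b => decide (key b < key a)) x (pvBuckets key n ps)
      = pvBuckets key n (ps ++ [x]) := by
  unfold pvBuckets
  rw [pvDesc_split n (key x) h0 hn]
  simp only [List.flatMap_append, List.flatMap_cons, List.flatMap_nil, List.append_nil]
  rw [pvInsertBy_append_false _ _ _ _ (by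
    intro z hz
    simp only [List.mem_append, List.mem_flatMap, List.mem_filter, List.mem_reverse,
      PySem.List.mem_pyRange_one] at hz
    rcases hz with ⟨c, ⟨hc1, _⟩, _, hzc⟩ | ⟨_, hzc⟩
    · have : key z = c := by simpa using hzc
      simp; omega
    · have : key z = key x := by simpa using hzc
      simp; omega)]
  rw [pvInsertBy_all_true _ _ _ (by
    intro y hy
    simp only [List.mem_flatMap, List.mem_filter, List.mem_reverse,
      PySem.List.mem_pyRange_one] at hy
    obtain ⟨c, ⟨_, hc2⟩, _, hyc⟩ := hy
    have : key y = c := by simpa using hyc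
    simp; omega)]
  have hfilter_ne : ∀ c : Int, c ≠ key x →
      (ps ++ [x]).filter (fun p => key p == c) = ps.filter (fun p => key p == c) := by
    intro c hc
    rw [List.filter_append]
    simp [hc.symm]
  have hxc : (ps ++ [x]).filter (fun p => key p == key x)
      = ps.filter (fun p => key p == key x) ++ [x] := by
    rw [List.filter_append]; simp
  conv_rhs =>
    rw [pvFlatMap_congr (l := (PySem.List.pyRange (key x + 1) (n + 1) 1).reverse)
        (f := fun c => (ps ++ [x]).filter (fun p => key p == c))
        (g := fun c => ps.filter (fun p => key p == c)) (by
      intro c hc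
      simp only [List.mem_reverse, PySem.List.mem_pyRange_one] at hc
      exact hfilter_ne c (by omega)),
      pvFlatMap_congr (l := (PySem.List.pyRange 0 (key x) 1).reverse)
        (f := fun c => (ps ++ [x]).filter (fun p => key p == c))
        (g := fun c => ps.filter (fun p => key p == c)) (by
      intro c hc
      simp only [List.mem_reverse, PySem.List.mem_pyRange_one] at hc
      exact hfilter_ne c (by omega)),
      hxc]
  simp

lemma pvSorted_rev_eq_buckets {α : Type} (key : α → Int) (n : Int) (ps : List α)
    (h : ∀ p ∈ ps, 0 ≤ key p ∧ key p ≤ n) :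
    PySem.List.sorted ps key true = pvBuckets key n ps := by
  rw [PySem.List.sorted_rev_eq_foldl_insertBy]
  induction ps using List.reverseRecOn with
  | nil =>
    unfold pvBuckets
    simp [List.filter_nil]
  | append_singleton ps x ih =>
    rw [List.foldl_append, List.foldl_cons, List.foldl_nil]
    rw [ih (fun p hp => h p (List.mem_append_left _ hp))]
    exact pvBuckets_step key n ps x (h x (by simp)).1 (h x (by simp)).2

/- ## dict plumbing -/

lemma pvFoldl_nested {δ : Type} (xs : List Int) (g : Int → List Int)
    (step : δ → Int → Int → δ) (init : δ) :
    xs.foldl (fun r c => (g c).foldl (fun r d => step r d c) r) init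
      = (xs.flatMap (fun c => (g c).map (fun d => (d, c)))).foldl
          (fun r p => step r p.1 p.2) init := by
  induction xs generalizing init with
  | nil => rfl
  | cons c xs ih =>
    simp only [List.foldl_cons, List.flatMap_cons, List.foldl_append, List.foldl_map]
    exact ih _

lemma pvEmpty_items {κ ν : Type} [BEq κ] : (PySem.Dict.empty : PySem.Dict κ ν).items = [] := rfl

lemma pvEmpty_getD {κ ν : Type} [BEq κ] (k : κ) (d : ν) :
    (PySem.Dict.empty : PySem.Dict κ ν).getD k d = d := rfl

lemma pvEmpty_contains {κ ν : Type} [BEq κ] (k : κ) :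
    (PySem.Dict.empty : PySem.Dict κ ν).contains k = false := rfl

/- ## main assembly -/

def pvR (inicio termino : Int) : List Int := PySem.List.pyRange inicio (termino + 1) 1
def pvCnt (dezenas : List Int) (d : Int) : Int := ((PySem.List.count dezenas d : Nat) : Int)
def pvF (dezenas : List Int) (d : Int) : String × Int := (PySem.Int.toStr d, pvCnt dezenas d)
def pvS (inicio termino : Int) (dezenas : List Int) : List Int :=
  PySem.List.sorted (PySem.Set.ofList ((pvR inicio termino).map (fun d => pvCnt dezenas d)))
    (fun c => c) true

def pvL (cs : List Int) (inicio termino : Int) (dezenas : List Int) : List (Int × Int) :=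
  cs.flatMap
    (fun c => ((pvR inicio termino).filter (fun d => pvCnt dezenas d == c)).map (fun d => (d, c)))

lemma pvNodupR (inicio termino : Int) : ((pvR inicio termino).map PySem.Int.toStr).Nodup :=
  (PySem.List.nodup_pyRange_one _ _).map pvToStr_inj

lemma pvA1 (inicio termino : Int) (dezenas : List Int) :
    ((pvR inicio termino).foldl
      (fun d dezena => d.insert (PySem.Int.toStr dezena) (pvCnt dezenas dezena))
      (PySem.Dict.empty : PySem.Dict String Int)).items
      = (pvR inicio termino).map (pvF dezenas) := by
  rw [PySem.Dict.items_foldl_insert_fresh _ PySem.Int.toStr (fun d => pvCnt dezenas d) _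
    (fun a _ => pvEmpty_contains _) (pvNodupR inicio termino)]
  simp [pvEmpty_items, pvF]

lemma pvNodupS (inicio termino : Int) (dezenas : List Int) :
    ((PySem.List.sorted ((pvR inicio termino).map (pvF dezenas)) (fun item => item.2) true).map
      Prod.fst).Nodup := by
  have hperm := PySem.List.sorted_perm ((pvR inicio termino).map (pvF dezenas))
    (fun item : String × Int => item.2) true
  rw [(hperm.map Prod.fst).nodup_iff]
  have : ((pvR inicio termino).map (pvF dezenas)).map Prod.fst
      = (pvR inicio termino).map PySem.Int.toStr := by
    simp [List.map_map, Function.comp_def, pvF]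
  rw [this]
  exact pvNodupR inicio termino

lemma pvA (inicio termino : Int) (dezenas : List Int) :
    trabalhando_dezenas inicio termino dezenas
      = [PySem.List.sorted ((pvR inicio termino).map (pvF dezenas)) (fun item => item.2) true] := by
  show [((PySem.List.sorted
      (((pvR inicio termino).foldl
        (fun d dezena => d.insert (PySem.Int.toStr dezena) (pvCnt dezenas dezena))
        (PySem.Dict.empty : PySem.Dict String Int)).items)
      (fun item => item.2) true).foldl (fun d p => d.insert p.1 p.2) PySem.Dict.empty).items] = _
  rw [pvA1]
  rw [PySem.Dict.items_foldl_insert_fresh _ Prod.fst Prod.snd _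
    (fun a _ => pvEmpty_contains _) (pvNodupS inicio termino dezenas)]
  simp [pvEmpty_items]

lemma pvB1 (dezenas : List Int) (x : Int) :
    (dezenas.foldl (fun d x => d.insert x (d.getD x 0 + 1))
      (PySem.Dict.empty : PySem.Dict Int Int)).getD x 0 = pvCnt dezenas x := by
  rw [PySem.Dict.getD_foldl_insert_add_one]
  simp [pvCnt, PySem.List.count_eq]

lemma pvB2 (inicio termino : Int) (dezenas : List Int) (c : Int) :
    ((pvR inicio termino).foldl
      (fun b d => b.modify
        ((dezenas.foldl (fun d x => d.insert x (d.getD x 0 + 1))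
          (PySem.Dict.empty : PySem.Dict Int Int)).getD d 0) [] (fun l => l ++ [d]))
      (PySem.Dict.empty : PySem.Dict Int (List Int))).getD c []
      = (pvR inicio termino).filter (fun d => pvCnt dezenas d == c) := by
  simp only [pvB1]
  have hmap : (pvR inicio termino).foldl
      (fun b d => b.modify (pvCnt dezenas d) [] (fun l => l ++ [d]))
      (PySem.Dict.empty : PySem.Dict Int (List Int))
      = ((pvR inicio termino).map (fun d => (pvCnt dezenas d, d))).foldl
        (fun b p => b.modify p.1 [] (fun l => l ++ [p.2])) PySem.Dict.empty := by
    rw [List.foldl_map]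
  rw [hmap, PySem.Dict.getD_foldl_modify_append, pvEmpty_getD, List.filter_map]
  simp [Function.comp_def]

lemma pvS_nodup (inicio termino : Int) (dezenas : List Int) : (pvS inicio termino dezenas).Nodup := by
  unfold pvS
  rw [(PySem.List.sorted_perm _ _ _).nodup_iff]
  exact PySem.Set.nodup_ofList _

lemma pvS_gt (inicio termino : Int) (dezenas : List Int) :
    (pvS inicio termino dezenas).Pairwise (· > ·) := by
  have h1 := PySem.List.sorted_pairwise_rev
    (PySem.Set.ofList ((pvR inicio termino).map (fun d => pvCnt dezenas d))) (fun c : Int => c)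
  have h2 := pvS_nodup inicio termino dezenas
  unfold pvS
  exact (h1.and h2).imp (fun h => by omega)

lemma pvS_mem (inicio termino : Int) (dezenas : List Int) (c : Int) :
    c ∈ pvS inicio termino dezenas ↔ c ∈ (pvR inicio termino).map (fun d => pvCnt dezenas d) := by
  unfold pvS
  rw [PySem.List.mem_sorted, PySem.Set.mem_ofList]

lemma pvNodupL (cs : List Int) (hcs : cs.Nodup) (inicio termino : Int) (dezenas : List Int) :
    ((pvL cs inicio termino dezenas).map (fun p => PySem.Int.toStr p.1)).Nodup := by
  unfold pvL
  rw [List.map_flatMap, List.nodup_flatMap]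
  constructor
  · intro c _
    simp only [List.map_map]
    exact ((PySem.List.nodup_pyRange_one _ _).filter _).map
      (fun a b hab => pvToStr_inj hab)
  · refine hcs.imp ?_
    intro a b hne
    simp only [Function.onFun, List.map_map]
    intro s hs1 hs2
    simp only [List.mem_map, List.mem_filter, Function.comp_def] at hs1 hs2
    obtain ⟨d1, ⟨hd1R, hc1⟩, hs1'⟩ := hs1
    obtain ⟨d2, ⟨hd2R, hc2⟩, hs2'⟩ := hs2
    have hd : d1 = d2 := pvToStr_inj (hs1'.trans hs2'.symm)
    rw [beq_iff_eq] at hc1 hc2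
    exact hne (hc1 ▸ hd ▸ hc2 ▸ rfl)

lemma pvFlatMapDesc {β : Type} (f : Int → List β) (b : Int) :
    ∀ (k : Nat) (a : Int) (S : List Int), (a - b).toNat = k →
      S.Pairwise (· > ·) → (∀ c ∈ S, b < c ∧ c ≤ a) →
      (∀ c, b < c → c ≤ a → c ∉ S → f c = []) →
      (PySem.List.pyRange a b (-1)).flatMap f = S.flatMap f := by
  intro k
  induction k with
  | zero =>
    intro a S hk hS hmem hout
    rw [PySem.List.pyRange_neg_one_eq_nil (by omega)]
    cases S with
    | nil => rfl
    | cons c S' => exact absurd (hmem c (List.mem_cons_self ..)) (by omega)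
  | succ k ih =>
    intro a S hk hS hmem hout
    have hab : b < a := by omega
    rw [PySem.List.pyRange_neg_one_cons hab, List.flatMap_cons]
    by_cases haS : a ∈ S
    · cases S with
      | nil => simp at haS
      | cons s S' =>
        have hsa : s = a := by
          rcases List.mem_cons.mp haS with rfl | hmem'
          · rfl
          · have h1 := (List.pairwise_cons.mp hS).1 a hmem'
            have h2 := (hmem s (List.mem_cons_self ..)).2
            omega
        subst hsa
        rw [List.flatMap_cons]
        have hS' := (List.pairwise_cons.mp hS).2
        have hhd := (List.pairwise_cons.mp hS).1
        refine congrArg (f s ++ ·)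
          (ih (s - 1) S' (by omega) hS' ?_ ?_)
        · intro c hc
          have := hmem c (List.mem_cons_of_mem _ hc)
          have := hhd c hc
          omega
        · intro c h1 h2 h3
          refine hout c h1 (by omega) ?_
          intro hcS
          rcases List.mem_cons.mp hcS with rfl | hc'
          · omega
          · exact h3 hc'
    · rw [hout a hab le_rfl haS, List.nil_append]
      refine ih (a - 1) S (by omega) hS ?_ (fun c h1 h2 h3 => hout c h1 (by omega) h3)
      intro c hc
      have h1 := hmem c hc
      have : c ≠ a := fun h => haS (h ▸ hc)
      omega

lemma pvB (inicio termino : Int) (dezenas : List Int) :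
    trabalhando_dezenas_alt inicio termino dezenas
      = [(pvL (pvS inicio termino dezenas) inicio termino dezenas).map
          (fun p => (PySem.Int.toStr p.1, p.2))] := by
  show [((PySem.List.sorted
      ((pvR inicio termino).foldl
        (fun b d => b.modify
          ((dezenas.foldl (fun d x => d.insert x (d.getD x 0 + 1))
            (PySem.Dict.empty : PySem.Dict Int Int)).getD d 0) [] (fun l => l ++ [d]))
        (PySem.Dict.empty : PySem.Dict Int (List Int))).keys (fun c => c) true).foldl
      (fun r c => (((pvR inicio termino).foldl
          (fun b d => b.modify
            ((dezenas.foldl (fun d x => d.insert x (d.getD x 0 + 1))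
              (PySem.Dict.empty : PySem.Dict Int Int)).getD d 0) [] (fun l => l ++ [d]))
          (PySem.Dict.empty : PySem.Dict Int (List Int))).getD c []).foldl
        (fun r d => r.insert (PySem.Int.toStr d) c) r)
      (PySem.Dict.empty : PySem.Dict String Int)).items] = _
  have hkeys := PySem.Dict.keys_foldl_modify_key (pvR inicio termino)
    (fun d => (dezenas.foldl (fun d x => d.insert x (d.getD x 0 + 1))
      (PySem.Dict.empty : PySem.Dict Int Int)).getD d 0)
    ([] : List Int) (fun _ x => fun l => l ++ [x])
    (PySem.Dict.empty : PySem.Dict Int (List Int))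
  beta_reduce at hkeys
  rw [hkeys, show PySem.Set.update ((PySem.Dict.empty : PySem.Dict Int (List Int)).keys)
      ((pvR inicio termino).map (fun d => (dezenas.foldl (fun d x => d.insert x (d.getD x 0 + 1))
        (PySem.Dict.empty : PySem.Dict Int Int)).getD d 0))
      = PySem.Set.ofList ((pvR inicio termino).map
          (fun d => (dezenas.foldl (fun d x => d.insert x (d.getD x 0 + 1))
            (PySem.Dict.empty : PySem.Dict Int Int)).getD d 0)) from by
    rw [PySem.Set.ofList_eq_foldl]; rfl]
  simp only [pvB2]
  simp only [pvB1]
  have hnest := pvFoldl_nested (δ := PySem.Dict String Int)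
    (PySem.List.sorted (PySem.Set.ofList ((pvR inicio termino).map (fun d => pvCnt dezenas d)))
      (fun c => c) true)
    (fun c => (pvR inicio termino).filter (fun d => pvCnt dezenas d == c))
    (fun r d c => r.insert (PySem.Int.toStr d) c) PySem.Dict.empty
  beta_reduce at hnest
  rw [hnest]
  have hfresh := PySem.Dict.items_foldl_insert_fresh
    ((PySem.List.sorted (PySem.Set.ofList ((pvR inicio termino).map (fun d => pvCnt dezenas d)))
        (fun c => c) true).flatMap
      (fun c => ((pvR inicio termino).filter (fun d => pvCnt dezenas d == c)).map (fun d => (d, c))))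
    (fun p : Int × Int => PySem.Int.toStr p.1) (fun p : Int × Int => p.2)
    (PySem.Dict.empty : PySem.Dict String Int)
    (fun a _ => pvEmpty_contains _)
    (by have h := pvNodupL (pvS inicio termino dezenas) (pvS_nodup inicio termino dezenas)
          inicio termino dezenas
        unfold pvL pvS at h
        exact h)
  beta_reduce at hfresh
  rw [hfresh, pvEmpty_items]
  unfold pvL pvS
  rfl

lemma pvBounds (inicio termino : Int) (dezenas : List Int) :
    ∀ p ∈ (pvR inicio termino).map (pvF dezenas), 0 ≤ p.2 ∧ p.2 ≤ (dezenas.length : Int) := by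
  intro p hp
  obtain ⟨d, _, rfl⟩ := List.mem_map.mp hp
  simp only [pvF, pvCnt]
  refine ⟨Int.natCast_nonneg _, ?_⟩
  rw [PySem.List.count_eq]
  exact_mod_cast List.count_le_length

lemma pvPerC (inicio termino : Int) (dezenas : List Int) (c : Int) :
    ((pvR inicio termino).map (pvF dezenas)).filter (fun p => p.2 == c)
      = (((pvR inicio termino).filter (fun d => pvCnt dezenas d == c)).map
          (fun d => (d, c))).map (fun p => (PySem.Int.toStr p.1, p.2)) := by
  rw [List.filter_map]
  simp only [List.map_map, Function.comp_def]
  have hpred : ((pvR inicio termino).filter (fun d => (pvF dezenas d).2 == c))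
      = (pvR inicio termino).filter (fun d => pvCnt dezenas d == c) := rfl
  rw [hpred]
  apply List.map_congr_left
  intro d hd
  have := (List.mem_filter.mp hd).2
  rw [beq_iff_eq] at this
  simp [pvF, this]

lemma pvMain (inicio termino : Int) (dezenas : List Int) :
    trabalhando_dezenas inicio termino dezenas = trabalhando_dezenas_alt inicio termino dezenas := by
  rw [pvA, pvB]
  simp only [List.cons.injEq, and_true]
  rw [pvSorted_rev_eq_buckets (fun item : String × Int => item.2) (dezenas.length : Int) _
    (pvBounds inicio termino dezenas)]
  unfold pvBuckets pvL
  rw [List.map_flatMap]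
  conv_rhs => rw [pvFlatMap_congr (l := pvS inicio termino dezenas)
    (f := fun c => (((pvR inicio termino).filter (fun d => pvCnt dezenas d == c)).map
      (fun d => (d, c))).map (fun p => (PySem.Int.toStr p.1, p.2)))
    (g := fun c => ((pvR inicio termino).map (pvF dezenas)).filter (fun p => p.2 == c))
    (fun c _ => (pvPerC inicio termino dezenas c).symm)]
  refine pvFlatMapDesc _ (-1) (((dezenas.length : Int) - (-1)).toNat) _ _ rfl
    (pvS_gt inicio termino dezenas) ?_ ?_
  · intro c hc
    rw [pvS_mem] at hc
    obtain ⟨d, _, rfl⟩ := List.mem_map.mp hc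
    have h0 : (0 : Int) ≤ pvCnt dezenas d := by
      simp only [pvCnt]; exact Int.natCast_nonneg _
    have h1 : pvCnt dezenas d ≤ (dezenas.length : Int) := by
      simp only [pvCnt, PySem.List.count_eq]
      exact_mod_cast List.count_le_length
    omega
  · intro c _ _ hc
    rw [List.filter_eq_nil_iff]
    intro p hp
    obtain ⟨d, hdR, rfl⟩ := List.mem_map.mp hp
    intro hbeq
    apply hc
    rw [pvS_mem]
    have : pvCnt dezenas d = c := by
      have : (pvF dezenas d).2 = c := by rwa [beq_iff_eq] at hbeq
      simpa [pvF] using this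
    exact this ▸ List.mem_map_of_mem hdR

-- ===== VERDICT (by name: the statement is the Claim_ definition above) =====
theorem trabalhando_dezenas_spec : Claim_equal_trabalhando_dezenas := by
  intro inicio termino dezenas _
  unfold Spec_trabalhando_dezenas
  exact pvMain inicio termino dezenas
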